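-- pv_equiv track=rewrite | github.com/DevDodge/block-preventer-bridge | bpb-complete-project/block-preventer-bridge/backend/app/services/global_queue_service.py | _interleave_recipients
-- ===== SOURCE A (Python) =====
-- from typing import Dict, List, Tuple, Optional
--
-- def _interleave_recipients(
--     distribution: Dict[str, List[str]]
-- ) -> List[Tuple[str, str]]:
--     """
--     Interleave recipients across profiles in round-robin order.
--
--     Input:  {"A": [r1, r4, r7], "B": [r2, r5, r8], "C": [r3, r6, r9]}
--     Output: [(A, r1), (B, r2), (C, r3), (A, r4), (B, r5), (C, r6), (A, r7), (B, r8), (C, r9)]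
--
--     This ensures even distribution across the timeline.
--     """
--     result = []
--     profile_ids = list(distribution.keys())
--
--     if not profile_ids:
--         return result
--
--     # Find the max number of recipients any profile has
--     max_recipients = max(len(recipients) for recipients in distribution.values())
--
--     for i in range(max_recipients):
--         for profile_id in profile_ids:
--             recipients = distribution[profile_id]
--             if i < len(recipients):
--                 result.append((profile_id, recipients[i]))
--
--     return result
-- ===== SOURCE B (Python) =====
-- from typing import Dict, List, Tuple
--
-- def _interleave_recipients(
--     distribution: Dict[str, List[str]]
-- ) -> List[Tuple[str, str]]:
--     """Round-robin interleave, visiting only still-active profiles.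
--
--     Keeps an ordered list of profiles that still have recipients left and
--     drops a profile as soon as it is exhausted, so a round visits only
--     profiles that actually contribute a recipient."""
--     result = []
--     active = [(pid, recipients) for pid, recipients in distribution.items() if recipients]
--     i = 0
--     while active:
--         nxt = []
--         for pid, recipients in active:
--             result.append((pid, recipients[i]))
--             if i + 1 < len(recipients):
--                 nxt.append((pid, recipients))
--         active = nxt
--         i += 1
--     return result
-- ===== Notes on version B (the rewrite author's own statement) =====
-- stated objective: alternative
-- what changed: A iterates max-length rounds and re-scans every profile in every round, skipping exhausted ones; B maintains an ordered list of still-active profiles and drops a profile the moment it runs out, so each round visits only profiles that still emit a recipient.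
import Mathlib
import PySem

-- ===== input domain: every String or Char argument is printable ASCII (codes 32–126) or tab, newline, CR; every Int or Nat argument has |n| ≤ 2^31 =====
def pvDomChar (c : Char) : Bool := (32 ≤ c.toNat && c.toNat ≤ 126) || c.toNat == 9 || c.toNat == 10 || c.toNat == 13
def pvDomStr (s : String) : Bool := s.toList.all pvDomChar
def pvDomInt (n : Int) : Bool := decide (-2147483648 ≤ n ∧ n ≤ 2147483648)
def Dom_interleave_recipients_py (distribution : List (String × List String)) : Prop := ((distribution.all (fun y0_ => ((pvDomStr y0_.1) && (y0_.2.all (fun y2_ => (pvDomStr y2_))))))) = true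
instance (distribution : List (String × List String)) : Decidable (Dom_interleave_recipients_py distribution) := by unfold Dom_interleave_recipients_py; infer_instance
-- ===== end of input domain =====

-- B drops exhausted profiles from an ordered active list instead of re-scanning every profile each round.


-- ===== PORT A =====
-- the dict argument arrives as its association list; build the PySem.Dict first (dict semantics)
def interleave_recipients_py (distribution : List (String × List String)) : List (String × String) :=
  let d := PySem.Dict.ofList distribution
  let result : List (String × String) := []
  let profile_ids := d.keys
  if profile_ids.isEmpty then result
  else
    -- max(len(recipients) for recipients in distribution.values()); nonempty here, so the default is never read
    let max_recipients : Int :=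
      ((PySem.List.max? (d.values.map (fun rs => (rs.length : Int))) (fun x => x)).getD 0)
    (PySem.List.pyRange 0 max_recipients 1).foldl
      (fun result i =>
        profile_ids.foldl
          (fun result pid =>
            let recipients := d.getD pid []
            if i < (recipients.length : Int) then
              result ++ [(pid, PySem.List.pyGetD recipients i "")]
            else result)
          result)
      result

-- ===== PORT B =====
-- one pass of the 'for pid, recipients in active:' body: (result with this round appended, next active list)
def pvStep (i : Int) (active : List (String × List String)) (result : List (String × String)) :
    List (String × String) × List (String × List String) :=
  active.foldl
    (fun (acc : List (String × String) × List (String × List String)) e =>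
      (acc.1 ++ [(e.1, PySem.List.pyGetD e.2 i "")],
       if i + 1 < (e.2.length : Int) then acc.2 ++ [e] else acc.2))
    (result, ([] : List (String × List String)))

theorem pvStep_snd (i : Int) (active : List (String × List String)) (result : List (String × String)) :
    (pvStep i active result).2 = active.filter (fun e => decide (i + 1 < (e.2.length : Int))) := by
  suffices h : ∀ (l : List (String × List String)) (r : List (String × String)) (init : List (String × List String)),
      (l.foldl (fun (acc : List (String × String) × List (String × List String)) e =>
        (acc.1 ++ [(e.1, PySem.List.pyGetD e.2 i "")],
         if i + 1 < (e.2.length : Int) then acc.2 ++ [e] else acc.2)) (r, init)).2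
      = init ++ l.filter (fun e => decide (i + 1 < (e.2.length : Int))) by
    simpa [pvStep] using h active result []
  intro l
  induction l with
  | nil => intro r init; simp
  | cons a t ih =>
    intro r init
    simp only [List.foldl_cons, List.filter_cons]
    by_cases h : i + 1 < (a.2.length : Int)
    · simp only [if_pos h, decide_eq_true h, ih]; simp
    · simp only [if_neg h, decide_eq_false h, ih]; simp

theorem pvLen_le_measure (i : Int) (l : List (String × List String)) :
    l.length ≤ (l.map (fun e => ((e.2.length : Int) + 1 - i).toNat + 1)).sum := by
  induction l with
  | nil => simp
  | cons b t ih => simp only [List.length_cons, List.map_cons, List.sum_cons]; omega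

theorem pvStep_measure (i : Int) (a : String × List String) (rest : List (String × List String))
    (result : List (String × String)) :
    ((pvStep i (a :: rest) result).2.map (fun e => ((e.2.length : Int) + 1 - (i + 1)).toNat + 1)).sum
      < ((a :: rest).map (fun e => ((e.2.length : Int) + 1 - i).toNat + 1)).sum := by
  rw [pvStep_snd]
  have hle : ∀ (l : List (String × List String)),
      ((l.filter (fun e => decide (i + 1 < (e.2.length : Int)))).map
        (fun e => ((e.2.length : Int) + 1 - (i + 1)).toNat + 1)).sum
      ≤ (l.map (fun e => ((e.2.length : Int) + 1 - i).toNat + 1)).sum - l.length := by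
    intro l
    induction l with
    | nil => simp
    | cons b t ih =>
      simp only [List.filter_cons, List.map_cons, List.sum_cons, List.length_cons]
      by_cases h : i + 1 < (b.2.length : Int)
      · rw [if_pos (by simpa using h)]
        simp only [List.map_cons, List.sum_cons]
        have hb : ((b.2.length : Int) + 1 - (i + 1)).toNat + 1 ≤ ((b.2.length : Int) + 1 - i).toNat := by
          omega
        have hg := pvLen_le_measure i t
        omega
      · rw [if_neg (by simpa using h)]
        have hg := pvLen_le_measure i t
        omega
  have h1 := hle (a :: rest)
  simp only [List.length_cons] at h1
  have h2 : 0 < ((a :: rest).map (fun e => ((e.2.length : Int) + 1 - i).toNat + 1)).sum := by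
    simp only [List.map_cons, List.sum_cons]; omega
  omega

-- 'while active:' loop of Source B; each round emits one recipient per active profile and keeps only profiles with more left
def pvAltLoop (active : List (String × List String)) (i : Int) (result : List (String × String)) : List (String × String) :=
  match active with
  | [] => result
  | a :: rest =>
    pvAltLoop (pvStep i (a :: rest) result).2 (i + 1) (pvStep i (a :: rest) result).1
termination_by (active.map (fun e => ((e.2.length : Int) + 1 - i).toNat + 1)).sum
decreasing_by
  exact pvStep_measure i a rest result

def interleave_recipients_py_alt (distribution : List (String × List String)) : List (String × String) :=
  let d := PySem.Dict.ofList distribution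
  let active := d.items.filter (fun e => !e.2.isEmpty)
  pvAltLoop active 0 []

-- ===== PRECONDITION & SPEC =====
def Spec_interleave_recipients_py (distribution : List (String × List String)) (out : List (String × String)) : Prop := out = interleave_recipients_py_alt distribution
instance (distribution : List (String × List String)) (out : List (String × String)) : Decidable (Spec_interleave_recipients_py distribution out) := by unfold Spec_interleave_recipients_py; infer_instance

-- ===== CLAIM (what is proved, stated in full; the proofs are below) =====
def Claim_equal_interleave_recipients_py : Prop := ∀ (distribution : List (String × List String)), Dom_interleave_recipients_py distribution → Spec_interleave_recipients_py distribution (interleave_recipients_py distribution)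

-- ===== LEMMAS AND PROOFS =====

-- round j of the interleaving: one recipient from every profile that still has a j-th one
def pvRound (l : List (String × List String)) (j : Nat) : List (String × String) :=
  (l.filter (fun e => decide (j < e.2.length))).map (fun e => (e.1, e.2.getD j ""))

-- maximum recipient-list length
def pvMax (l : List (String × List String)) : Nat :=
  (l.map (fun e => e.2.length)).foldl max 0

theorem pvFoldlMax_le (ns : List Nat) : ∀ (a c : Nat), (ns.foldl max a ≤ c ↔ a ≤ c ∧ ∀ n ∈ ns, n ≤ c) := by
  induction ns with
  | nil => intro a c; simp
  | cons m t ih =>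
    intro a c
    simp only [List.foldl_cons, ih, List.mem_cons]
    constructor
    · rintro ⟨h1, h2⟩
      exact ⟨le_trans (le_max_left a m) h1, fun n hn => hn.elim (fun h => h ▸ le_trans (le_max_right a m) h1) (h2 n)⟩
    · rintro ⟨h1, h2⟩
      exact ⟨max_le h1 (h2 m (Or.inl rfl)), fun n hn => h2 n (Or.inr hn)⟩

theorem pvMax_le_iff (l : List (String × List String)) (c : Nat) :
    pvMax l ≤ c ↔ ∀ e ∈ l, e.2.length ≤ c := by
  unfold pvMax
  rw [pvFoldlMax_le]
  simp only [Nat.zero_le, true_and, List.mem_map, forall_exists_index, and_imp]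
  exact ⟨fun h e he => h e.2.length e he rfl, fun h n e he hn => hn ▸ h e he⟩

theorem pvStep_fst (i : Int) (l : List (String × List String)) (r : List (String × String)) :
    (pvStep i l r).1 = r ++ l.map (fun e => (e.1, PySem.List.pyGetD e.2 i "")) := by
  suffices h : ∀ (t : List (String × List String)) (r : List (String × String)) (init : List (String × List String)),
      (t.foldl (fun (acc : List (String × String) × List (String × List String)) e =>
        (acc.1 ++ [(e.1, PySem.List.pyGetD e.2 i "")],
         if i + 1 < (e.2.length : Int) then acc.2 ++ [e] else acc.2)) (r, init)).1
      = r ++ t.map (fun e => (e.1, PySem.List.pyGetD e.2 i "")) by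
    simpa [pvStep] using h l r []
  intro t
  induction t with
  | nil => intro r init; simp
  | cons a u ih =>
    intro r init
    simp only [List.foldl_cons, List.map_cons]
    by_cases h : i + 1 < (a.2.length : Int)
    · rw [if_pos h, ih]; simp
    · rw [if_neg h, ih]; simp

theorem pvLoop_exhausted (l : List (String × List String)) (j : Nat) (r : List (String × String))
    (h : pvMax l ≤ j) :
    pvAltLoop (l.filter (fun e => decide (j < e.2.length))) (j : Int) r
      = r ++ (List.range (pvMax l - j)).flatMap (fun k => pvRound l (j + k)) := by
  have h1 : ∀ e ∈ l, e.2.length ≤ j := (pvMax_le_iff l j).mp h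
  have h2 : l.filter (fun e => decide (j < e.2.length)) = [] := by
    rw [List.filter_eq_nil_iff]
    intro e he
    simpa using Nat.not_lt.mpr (h1 e he)
  have h3 : pvMax l - j = 0 := by omega
  rw [h2, h3]
  simp [pvAltLoop]

theorem pvLoop_spec : ∀ (n j : Nat) (l : List (String × List String)) (r : List (String × String)),
    pvMax l - j ≤ n →
    pvAltLoop (l.filter (fun e => decide (j < e.2.length))) (j : Int) r
      = r ++ (List.range (pvMax l - j)).flatMap (fun k => pvRound l (j + k)) := by
  intro n
  induction n with
  | zero =>
    intro j l r h
    exact pvLoop_exhausted l j r (by omega)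
  | succ n ih =>
    intro j l r h
    by_cases hle : pvMax l ≤ j
    · exact pvLoop_exhausted l j r hle
    · have hj : j < pvMax l := Nat.not_le.mp hle
      -- the active list is nonempty
      have hne : l.filter (fun e => decide (j < e.2.length)) ≠ [] := by
        intro hnil
        apply hle
        rw [pvMax_le_iff]
        intro e he
        by_contra hlen
        have : e ∈ l.filter (fun e => decide (j < e.2.length)) :=
          List.mem_filter.mpr ⟨he, by simpa using Nat.lt_of_not_le hlen⟩
        simp [hnil] at this
      obtain ⟨a, rest, hF⟩ := List.exists_cons_of_ne_nil hne
      rw [hF]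
      rw [pvAltLoop]
      rw [← hF, pvStep_snd, pvStep_fst]
      -- second component: profiles that still have a (j+1)-th recipient
      have hsnd : (l.filter (fun e => decide (j < e.2.length))).filter
            (fun e => decide ((j : Int) + 1 < (e.2.length : Int)))
          = l.filter (fun e => decide (j + 1 < e.2.length)) := by
        rw [List.filter_filter]
        apply List.filter_congr
        intro e _
        by_cases h1 : j + 1 < e.2.length
        · have h0 : j < e.2.length := by omega
          have h2 : (j : Int) + 1 < (e.2.length : Int) := by exact_mod_cast h1
          simp [h0, h1, h2]
        · have h2 : ¬ ((j : Int) + 1 < (e.2.length : Int)) := by exact_mod_cast h1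
          simp [h1, h2]
      -- first component: round j appended to the result
      have hfst : r ++ (l.filter (fun e => decide (j < e.2.length))).map
            (fun e => (e.1, PySem.List.pyGetD e.2 (j : Int) ""))
          = r ++ pvRound l j := by
        simp [pvRound, PySem.List.pyGetD_natCast]
      rw [hsnd, hfst]
      have hcast : ((j : Int) + 1) = ((j + 1 : Nat) : Int) := by push_cast; ring
      rw [hcast, ih (j + 1) l (r ++ pvRound l j) (by omega)]
      have hsplit : pvMax l - j = (pvMax l - (j + 1)) + 1 := by omega
      rw [hsplit, List.range_succ_eq_map]
      rw [List.flatMap_cons]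
      have hmap : (List.map Nat.succ (List.range (pvMax l - (j + 1)))).flatMap
            (fun k => pvRound l (j + k))
          = (List.range (pvMax l - (j + 1))).flatMap (fun k => pvRound l (j + 1 + k)) := by
        rw [List.flatMap_map]
        apply List.flatMap_congr
        intro k _
        congr 1
        omega
      rw [hmap]
      simp [List.append_assoc]

theorem pvCastFoldlMax (vs : List (List String)) : ∀ (a : Nat),
    (vs.map (fun rs => ((rs.length : Nat) : Int))).foldl max ((a : Nat) : Int)
      = (((vs.map (fun rs => rs.length)).foldl max a : Nat) : Int) := by
  induction vs with
  | nil => intro a; simp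
  | cons m t ih =>
    intro a
    simp only [List.map_cons, List.foldl_cons]
    rw [show max ((a : Nat) : Int) ((m.length : Nat) : Int) = ((max a m.length : Nat) : Int) by push_cast; rfl, ih]


-- ===== VERDICT (by name: the statement is the Claim_ definition above) =====
theorem pvFilterCast (l : List (String × List String)) (j : Nat) :
    l.filter (fun e => decide ((j : Int) < (e.2.length : Int)))
      = l.filter (fun e => decide (j < e.2.length)) := by
  apply List.filter_congr
  intro e _
  rw [decide_eq_decide]
  exact_mod_cast Iff.rfl

theorem pvRound_eq (its : List (String × List String)) (j : Nat) :
    (its.filter (fun e => decide ((j : Int) < (e.2.length : Int)))).map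
        (fun e => (e.1, PySem.List.pyGetD e.2 (j : Int) ""))
      = pvRound its j := by
  rw [pvFilterCast]
  unfold pvRound
  simp [PySem.List.pyGetD_natCast]

theorem pvAlt_eq_flatMap (distribution : List (String × List String)) :
    interleave_recipients_py_alt distribution
      = (List.range (pvMax (PySem.Dict.ofList distribution).items)).flatMap
          (fun j => pvRound (PySem.Dict.ofList distribution).items j) := by
  unfold interleave_recipients_py_alt
  have hfil : ((PySem.Dict.ofList distribution).items).filter (fun e => !e.2.isEmpty)
      = ((PySem.Dict.ofList distribution).items).filter (fun e => decide ((0 : Nat) < e.2.length)) := by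
    apply List.filter_congr
    intro e _
    cases e.2 <;> simp
  simp only [hfil]
  have h := pvLoop_spec (pvMax (PySem.Dict.ofList distribution).items) 0
    (PySem.Dict.ofList distribution).items [] (by omega)
  simp only [Nat.cast_zero, Nat.sub_zero, Nat.zero_add, List.nil_append] at h
  exact h

theorem interleave_recipients_py_spec : Claim_equal_interleave_recipients_py := by
  intro distribution _hdom
  unfold Spec_interleave_recipients_py
  rw [pvAlt_eq_flatMap]
  unfold interleave_recipients_py
  by_cases hk : (PySem.Dict.ofList distribution).items = []
  · have hkeys : (PySem.Dict.ofList distribution).keys = [] := by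
      simp only [PySem.Dict.keys, hk, List.map_nil]
    simp [hkeys, hk, pvMax]
  · obtain ⟨e0, tl, hitems⟩ := List.exists_cons_of_ne_nil hk
    have hkeys : (PySem.Dict.ofList distribution).keys
        = ((PySem.Dict.ofList distribution).items).map (fun e => e.1) := by
      simp only [PySem.Dict.keys]
    have hne : ((PySem.Dict.ofList distribution).keys).isEmpty = false := by
      rw [hkeys, hitems]
      simp
    simp only [hne, Bool.false_eq_true, if_false]
    -- the computed maximum is (pvMax items : Int)
    have hvals : (PySem.Dict.ofList distribution).values
        = ((PySem.Dict.ofList distribution).items).map (fun e => e.2) := by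
      simp only [PySem.Dict.values]
    have hmax : ((PySem.List.max? (((PySem.Dict.ofList distribution).values).map
          (fun rs => (rs.length : Int))) (fun x => x)).getD 0)
        = ((pvMax ((PySem.Dict.ofList distribution).items) : Nat) : Int) := by
      rw [hvals, hitems]
      simp only [List.map_cons, PySem.List.max?_id_cons, Option.getD_some, List.map_map]
      have hc := pvCastFoldlMax (tl.map (fun e => e.2)) (e0.2.length)
      simp only [List.map_map] at hc
      rw [hc]
      unfold pvMax
      simp only [List.map_cons, List.foldl_cons, Nat.zero_max]
      rfl
    rw [hmax]
    rw [PySem.List.pyRange_zero_nat, List.foldl_map]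
    -- inner loop over the keys = one round over the items
    have hinner : ∀ (res : List (String × String)) (i : Int),
        ((PySem.Dict.ofList distribution).keys).foldl
          (fun res pid =>
            if i < (((PySem.Dict.ofList distribution).getD pid []).length : Int) then
              res ++ [(pid, PySem.List.pyGetD ((PySem.Dict.ofList distribution).getD pid []) i "")]
            else res) res
        = res ++ (((PySem.Dict.ofList distribution).items).filter
              (fun e => decide (i < (e.2.length : Int)))).map
            (fun e => (e.1, PySem.List.pyGetD e.2 i "")) := by
      intro res i
      have hik := PySem.Dict.items_eq_map_keys (PySem.Dict.ofList distribution)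
        (PySem.Dict.nodup_keys_ofList distribution) []
      conv_rhs => rw [hik]
      have hfa := PySem.List.foldl_append_ite
        (fun e : String × List String => i < (e.2.length : Int))
        (fun e : String × List String => (e.1, PySem.List.pyGetD e.2 i ""))
        (((PySem.Dict.ofList distribution).keys).map
          (fun k => (k, (PySem.Dict.ofList distribution).getD k [])))
        res
      rw [← hfa, List.foldl_map]
    simp only [hinner, pvRound_eq]
    rw [PySem.List.foldl_append_eq_flatMap]
    simp
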